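-- pv_equiv track=rewrite | github.com/maheshgm/ProgrammingGym | Feb-11-22/Coins.py | memo_dp
-- ===== SOURCE A (Python) =====
-- dp_table = {}
--
-- def memo_dp(amount):
-- 	if amount in dp_table:
-- 		return dp_table[amount]
--
-- 	if amount == 0:
-- 		return 0
--
-- 	coins = amount//2, amount//3, amount//4
--
-- 	maxCoins = 0
-- 	for coin in coins:
-- 		maxCoins += memo_dp(coin)
--
-- 	dp_table[amount] = max(maxCoins, amount)
-- 	return dp_table[amount]
-- ===== SOURCE B (Python) =====
-- def memo_dp(amount):
--     # Bottom-up: every reachable subproblem is amount // (2**a * 3**b); tabulate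
--     # those O(log^2 amount) divisors from largest to smallest instead of recursing.
--     divisors = []
--     p2 = 1
--     while p2 <= amount:
--         d = p2
--         while d <= amount:
--             divisors.append(d)
--             d *= 3
--         p2 *= 2
--     table = {}
--     for d in sorted(divisors, reverse=True):
--         table[d] = max(amount // d,
--                        table.get(2 * d, 0) + table.get(3 * d, 0) + table.get(4 * d, 0))
--     return table.get(1, 0)
-- ===== Notes on version B (the rewrite author's own statement) =====
-- stated objective: alternative
-- what changed: Replaces A's globally-memoized recursion with a recursion-free bottom-up pass: every reachable subproblem is amount//(2^a*3^b), so B enumerates those divisors with two while loops, sorts them descending, and fills a table iteratively.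
-- crash fix: On negative amounts A recurses forever (amount//2 stays negative) and raises RecursionError; B's divisor loop is empty there and it returns 0. — e.g. on memo_dp(-1): A raises RecursionError, B returns 0
import Mathlib
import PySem

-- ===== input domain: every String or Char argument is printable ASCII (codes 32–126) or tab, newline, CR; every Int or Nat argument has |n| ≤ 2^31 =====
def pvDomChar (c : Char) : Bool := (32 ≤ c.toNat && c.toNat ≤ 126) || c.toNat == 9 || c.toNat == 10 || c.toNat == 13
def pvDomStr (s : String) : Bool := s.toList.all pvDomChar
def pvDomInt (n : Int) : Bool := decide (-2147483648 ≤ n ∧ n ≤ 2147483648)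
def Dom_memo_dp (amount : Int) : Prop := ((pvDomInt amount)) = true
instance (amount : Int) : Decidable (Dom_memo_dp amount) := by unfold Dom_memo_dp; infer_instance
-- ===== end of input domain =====

-- B replaces A's globally-memoized recursion by a recursion-free bottom-up table over
-- the O(log² amount) reachable divisors 2^a·3^b (alternative decomposition; A also
-- mutates a module-level cache dp_table, which B does not — equivalence is about the
-- return value only).

-- ===== PORT A =====
-- memoized recursion, the module-level dict threaded through as state; fuel only makes
-- the recursion total (amount.toNat + 1 steps always suffice on the admitted inputs)
def memo_dp_run : Nat → PySem.Dict Int Int → Int → Int × PySem.Dict Int Int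
  | 0, t, _ => (0, t)
  | fuel+1, t, amount =>
    match t.get? amount with
    | some v => (v, t)
    | none =>
      if amount = 0 then (0, t)
      else
        let coins := [PySem.Int.floordiv amount 2, PySem.Int.floordiv amount 3,
                      PySem.Int.floordiv amount 4]
        let st := coins.foldl (fun st c =>
            let p := memo_dp_run fuel st.2 c
            (st.1 + p.1, p.2)) ((0 : Int), t)
        let r := max st.1 amount
        (r, st.2.insert amount r)

def memo_dp (amount : Int) : Int :=
  (memo_dp_run (amount.toNat + 1) PySem.Dict.empty amount).1

-- ===== PORT B =====
-- inner 'while d <= amount: d *= 3' loop (fuel makes it total; it runs ≤ log₃ amount times)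
def pow3Loop (amount : Int) : Nat → Int → List Int
  | 0, _ => []
  | fuel+1, d => if d ≤ amount then d :: pow3Loop amount fuel (3 * d) else []

-- outer 'while p2 <= amount: … p2 *= 2' loop
def pow2Loop (amount : Int) : Nat → Int → List Int
  | 0, _ => []
  | fuel+1, p2 =>
    if p2 ≤ amount then pow3Loop amount (amount.toNat + 1) p2 ++ pow2Loop amount fuel (2 * p2)
    else []

def memo_dp_alt (amount : Int) : Int :=
  let divisors := pow2Loop amount (amount.toNat + 1) 1
  let table := (PySem.List.sorted divisors (fun x => x) true).foldl
    (fun (t : PySem.Dict Int Int) d =>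
      t.insert d (max (PySem.Int.floordiv amount d)
        (t.getD (2 * d) 0 + t.getD (3 * d) 0 + t.getD (4 * d) 0)))
    PySem.Dict.empty
  table.getD 1 0

-- ===== PRECONDITION & SPEC =====
-- Pre_ excludes negative amounts, on which A recurses forever (Python: RecursionError).
def Pre_memo_dp (amount : Int) : Prop := 0 ≤ amount
instance (amount : Int) : Decidable (Pre_memo_dp amount) := by unfold Pre_memo_dp; infer_instance
def pvWitness_memo_dp : Int := 12

-- On negative amounts A raises RecursionError (amount//2 never reaches 0); B returns 0.
def Raises_memo_dp (amount : Int) : Prop := amount < 0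
instance (amount : Int) : Decidable (Raises_memo_dp amount) := by unfold Raises_memo_dp; infer_instance
def pvRaiseWitness_memo_dp : Int := -1
def pvRaiseWitnessOut_memo_dp : Int := 0

def Spec_memo_dp (amount : Int) (out : Int) : Prop := out = memo_dp_alt amount
instance (amount : Int) (out : Int) : Decidable (Spec_memo_dp amount out) := by unfold Spec_memo_dp; infer_instance

-- ===== CLAIM (what is proved, stated in full; the proofs are below) =====
def Claim_equal_memo_dp : Prop := ∀ (amount : Int), Dom_memo_dp amount → Pre_memo_dp amount → Spec_memo_dp amount (memo_dp amount)
def Claim_raises_memo_dp : Prop := (∀ (amount : Int), Dom_memo_dp amount → Raises_memo_dp amount → ¬ Pre_memo_dp amount) ∧ (Dom_memo_dp (pvRaiseWitness_memo_dp) ∧ Raises_memo_dp (pvRaiseWitness_memo_dp) ∧ memo_dp_alt (pvRaiseWitness_memo_dp) = pvRaiseWitnessOut_memo_dp)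

-- ===== LEMMAS AND PROOFS =====

-- the common mathematical value: the recurrence itself
def gSpec (a : Int) : Int :=
  if h : a ≤ 0 then 0
  else max (gSpec (PySem.Int.floordiv a 2) + gSpec (PySem.Int.floordiv a 3) +
            gSpec (PySem.Int.floordiv a 4)) a
termination_by a.toNat
decreasing_by
  all_goals
    rw [PySem.Int.floordiv_eq_ediv_of_pos (by omega)]
    omega

lemma gSpec_nonpos {a : Int} (h : a ≤ 0) : gSpec a = 0 := by
  rw [gSpec]; simp [h]

lemma gSpec_pos {a : Int} (h : 0 < a) :
    gSpec a = max (gSpec (PySem.Int.floordiv a 2) + gSpec (PySem.Int.floordiv a 3) +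
      gSpec (PySem.Int.floordiv a 4)) a := by
  rw [gSpec]; simp [show ¬ a ≤ 0 by omega]

lemma fd_comp (a d c : Int) (ha : 0 ≤ a) (hd : 0 < d) (hc : 0 < c) :
    PySem.Int.floordiv (PySem.Int.floordiv a d) c = PySem.Int.floordiv a (d * c) := by
  rw [PySem.Int.floordiv_eq_ediv_of_pos hd, PySem.Int.floordiv_eq_ediv_of_pos hc,
    PySem.Int.floordiv_eq_ediv_of_pos (by positivity)]
  exact Int.ediv_ediv_of_nonneg (by omega)

-- ===== A side =====

def InvA (t : PySem.Dict Int Int) : Prop := ∀ k v, t.get? k = some v → v = gSpec k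

lemma memoA : ∀ (fuel : Nat) (a : Int) (t : PySem.Dict Int Int), 0 ≤ a → a.toNat < fuel →
    InvA t → (memo_dp_run fuel t a).1 = gSpec a ∧ InvA (memo_dp_run fuel t a).2 := by
  intro fuel
  induction fuel with
  | zero => intro a t _ hlt _; omega
  | succ fuel ih =>
    intro a t ha hlt hinv
    simp only [memo_dp_run]
    cases hget : t.get? a with
    | some v =>
      exact ⟨hinv a v hget, hinv⟩
    | none =>
      by_cases h0 : a = 0
      · subst h0
        exact ⟨(gSpec_nonpos le_rfl).symm, hinv⟩
      · have hpos : 0 < a := lt_of_le_of_ne ha (Ne.symm h0)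
        simp only [if_neg h0, List.foldl_cons, List.foldl_nil]
        obtain ⟨hb2, hb2'⟩ : 0 ≤ PySem.Int.floordiv a 2 ∧ (PySem.Int.floordiv a 2).toNat < a.toNat := by
          rw [PySem.Int.floordiv_eq_ediv_of_pos (by omega)]; omega
        obtain ⟨hb3, hb3'⟩ : 0 ≤ PySem.Int.floordiv a 3 ∧ (PySem.Int.floordiv a 3).toNat < a.toNat := by
          rw [PySem.Int.floordiv_eq_ediv_of_pos (by omega)]; omega
        obtain ⟨hb4, hb4'⟩ : 0 ≤ PySem.Int.floordiv a 4 ∧ (PySem.Int.floordiv a 4).toNat < a.toNat := by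
          rw [PySem.Int.floordiv_eq_ediv_of_pos (by omega)]; omega
        obtain ⟨e1, i1⟩ := ih (PySem.Int.floordiv a 2) t hb2 (by omega) hinv
        obtain ⟨e2, i2⟩ := ih (PySem.Int.floordiv a 3) _ hb3 (by omega) i1
        obtain ⟨e3, i3⟩ := ih (PySem.Int.floordiv a 4) _ hb4 (by omega) i2
        refine ⟨?_, ?_⟩
        · simp only [e1, e2, e3]
          rw [gSpec_pos hpos]
          ring_nf
        · intro k v hkv
          rw [PySem.Dict.get?_insert] at hkv
          split at hkv
          · next heq =>
            cases hkv
            subst heq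
            simp only [e1, e2, e3]
            rw [gSpec_pos hpos]
            ring_nf
          · exact i3 k v hkv

lemma memo_dp_eq_gSpec (a : Int) (ha : 0 ≤ a) : memo_dp a = gSpec a := by
  have h := memoA (a.toNat + 1) a PySem.Dict.empty ha (by omega)
    (by intro k v hv; simp [PySem.Dict.get?_empty] at hv)
  exact h.1

-- ===== B side =====

def IsDiv (x : Int) : Prop := ∃ a b : Nat, x = 2 ^ a * 3 ^ b

lemma IsDiv.one_le {x : Int} (h : IsDiv x) : 1 ≤ x := by
  obtain ⟨a, b, rfl⟩ := h
  have h2 : (1 : Int) ≤ 2 ^ a := one_le_pow₀ (by norm_num)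
  have h3 : (1 : Int) ≤ 3 ^ b := one_le_pow₀ (by norm_num)
  nlinarith

lemma IsDiv.mul_left {x : Int} (m : Int) (hm : IsDiv m) (h : IsDiv x) : IsDiv (m * x) := by
  obtain ⟨a, b, rfl⟩ := h
  obtain ⟨a', b', rfl⟩ := hm
  exact ⟨a' + a, b' + b, by ring⟩

lemma mem_pow3Loop {amount : Int} : ∀ (fuel : Nat) (d x : Int), x ∈ pow3Loop amount fuel d →
    ∃ b : Nat, x = d * 3 ^ b ∧ x ≤ amount := by
  intro fuel
  induction fuel with
  | zero => intro d x hx; simp [pow3Loop] at hx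
  | succ fuel ih =>
    intro d x hx
    rw [pow3Loop] at hx
    split at hx
    · rcases List.mem_cons.mp hx with h | h
      · exact ⟨0, by simp [h], by omega⟩
      · obtain ⟨b, hb, hle⟩ := ih (3 * d) x h
        exact ⟨b + 1, by rw [hb]; ring, hle⟩
    · simp at hx

lemma pow3Loop_complete {amount : Int} : ∀ (b fuel : Nat) (d : Int), 1 ≤ d → b < fuel →
    d * 3 ^ b ≤ amount → d * 3 ^ b ∈ pow3Loop amount fuel d := by
  intro b
  induction b with
  | zero =>
    intro fuel d hd hf hle
    obtain ⟨fuel, rfl⟩ : ∃ f, fuel = f + 1 := ⟨fuel - 1, by omega⟩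
    rw [pow3Loop]
    simp only [pow_zero, mul_one] at hle ⊢
    simp [hle]
  | succ b ih =>
    intro fuel d hd hf hle
    obtain ⟨fuel, rfl⟩ : ∃ f, fuel = f + 1 := ⟨fuel - 1, by omega⟩
    have h3 : (1 : Int) ≤ 3 ^ (b + 1) := one_le_pow₀ (by norm_num)
    have hdle : d ≤ amount := le_trans (le_mul_of_one_le_right (by omega) h3) hle
    rw [pow3Loop, if_pos hdle]
    have := ih fuel (3 * d) (by omega) (by omega)
      (by rw [show 3 * d * 3 ^ b = d * 3 ^ (b + 1) by ring]; exact hle)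
    exact List.mem_cons_of_mem _ (by rw [show d * 3 ^ (b + 1) = 3 * d * 3 ^ b by ring]; exact this)

lemma mem_pow2Loop {amount : Int} : ∀ (fuel : Nat) (p x : Int), x ∈ pow2Loop amount fuel p →
    ∃ a b : Nat, x = p * 2 ^ a * 3 ^ b ∧ x ≤ amount := by
  intro fuel
  induction fuel with
  | zero => intro p x hx; simp [pow2Loop] at hx
  | succ fuel ih =>
    intro p x hx
    rw [pow2Loop] at hx
    split at hx
    · rcases List.mem_append.mp hx with h | h
      · obtain ⟨b, hb, hle⟩ := mem_pow3Loop _ _ _ h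
        exact ⟨0, b, by rw [hb]; ring, hle⟩
      · obtain ⟨a, b, hab, hle⟩ := ih (2 * p) x h
        exact ⟨a + 1, b, by rw [hab]; ring, hle⟩
    · simp at hx

lemma pow2Loop_complete {amount : Int} (ha : 0 ≤ amount) :
    ∀ (a fuel : Nat) (p : Int) (b : Nat), 1 ≤ p → a < fuel →
    p * 2 ^ a * 3 ^ b ≤ amount → p * 2 ^ a * 3 ^ b ∈ pow2Loop amount fuel p := by
  intro a
  induction a with
  | zero =>
    intro fuel p b hp hf hle
    obtain ⟨fuel, rfl⟩ : ∃ f, fuel = f + 1 := ⟨fuel - 1, by omega⟩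
    have h23 : (1 : Int) ≤ 2 ^ 0 * 3 ^ b := IsDiv.one_le ⟨0, b, rfl⟩
    have hple : p ≤ amount := le_trans (by nlinarith) hle
    rw [pow2Loop, if_pos hple]
    apply List.mem_append_left
    have hble : p * 3 ^ b ≤ amount := by nlinarith
    have hbig : (3 : Int) ^ b ≤ amount := le_trans (le_mul_of_one_le_left (by positivity) hp) hble
    have hblt : (b : Int) < 3 ^ b := by
      calc (b : Int) < 2 ^ b := by exact_mod_cast Nat.lt_two_pow_self
        _ ≤ 3 ^ b := by gcongr <;> norm_num
    have hbf : b < amount.toNat + 1 := by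
      have : (3 : Int) ^ b ≤ (amount.toNat : Int) := by omega
      omega
    have := pow3Loop_complete b (amount.toNat + 1) p hp hbf hble
    rw [show p * 2 ^ 0 * 3 ^ b = p * 3 ^ b by ring]
    exact this
  | succ a ih =>
    intro fuel p b hp hf hle
    obtain ⟨fuel, rfl⟩ : ∃ f, fuel = f + 1 := ⟨fuel - 1, by omega⟩
    have h23 : (1 : Int) ≤ 2 ^ (a + 1) * 3 ^ b := IsDiv.one_le ⟨a + 1, b, rfl⟩
    have hple : p ≤ amount := le_trans (by nlinarith) hle
    rw [pow2Loop, if_pos hple]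
    apply List.mem_append_right
    have := ih fuel (2 * p) b (by omega) (by omega)
      (by rw [show 2 * p * 2 ^ a * 3 ^ b = p * 2 ^ (a + 1) * 3 ^ b by ring]; exact hle)
    rw [show p * 2 ^ (a + 1) * 3 ^ b = 2 * p * 2 ^ a * 3 ^ b by ring]
    exact this

lemma mem_divisors {amount x : Int} (ha : 0 ≤ amount) :
    x ∈ pow2Loop amount (amount.toNat + 1) 1 ↔ (IsDiv x ∧ x ≤ amount) := by
  constructor
  · intro hx
    obtain ⟨a, b, hab, hle⟩ := mem_pow2Loop _ _ _ hx
    exact ⟨⟨a, b, by rw [hab]; ring⟩, hle⟩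
  · rintro ⟨⟨a, b, rfl⟩, hle⟩
    have h3 : (1 : Int) ≤ 3 ^ b := one_le_pow₀ (by norm_num)
    have h2a : (2 : Int) ^ a ≤ amount := le_trans (le_mul_of_one_le_right (by positivity) h3) hle
    have halt : (a : Int) < 2 ^ a := by exact_mod_cast Nat.lt_two_pow_self
    have haf : a < amount.toNat + 1 := by
      have : (2 : Int) ^ a ≤ (amount.toNat : Int) := by omega
      omega
    have hmem := pow2Loop_complete ha a (amount.toNat + 1) 1 b le_rfl haf
      (by rw [one_mul]; exact hle)
    rwa [one_mul] at hmem

-- gSpec (amount // k) vanishes beyond amount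
lemma gSpec_fd_of_gt {amount k : Int} (ha : 0 ≤ amount) (hk : amount < k) :
    gSpec (PySem.Int.floordiv amount k) = 0 := by
  rw [PySem.Int.floordiv_eq_ediv_of_pos (by omega)]
  rw [Int.ediv_eq_zero_of_lt ha hk]
  exact gSpec_nonpos le_rfl

-- the B fold step
def stepB (amount : Int) (t : PySem.Dict Int Int) (d : Int) : PySem.Dict Int Int :=
  t.insert d (max (PySem.Int.floordiv amount d)
    (t.getD (2 * d) 0 + t.getD (3 * d) 0 + t.getD (4 * d) 0))

lemma foldB {amount : Int} (ha : 0 ≤ amount) :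
    ∀ (r done : List Int) (t : PySem.Dict Int Int),
    PySem.List.sorted (pow2Loop amount (amount.toNat + 1) 1) (fun x => x) true = done ++ r →
    (∀ k, t.getD k 0 = if k ∈ done then gSpec (PySem.Int.floordiv amount k) else 0) →
    ∀ k, (r.foldl (stepB amount) t).getD k 0 =
      if k ∈ done ++ r then gSpec (PySem.Int.floordiv amount k) else 0 := by
  intro r
  induction r with
  | nil => intro done t hL hinv k; simpa using hinv k
  | cons d r' ih =>
    intro done t hL hinv k
    have hdL : d ∈ pow2Loop amount (amount.toNat + 1) 1 := by
      rw [← PySem.List.mem_sorted (key := fun x => x) (rev := true), hL]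
      simp
    obtain ⟨hdDiv, hdle⟩ := (mem_divisors ha).mp hdL
    have hd1 : 1 ≤ d := hdDiv.one_le
    -- everything in r' is ≤ d
    have htail : ∀ y ∈ r', y ≤ d := by
      have hpair := PySem.List.sorted_pairwise_rev (pow2Loop amount (amount.toNat + 1) 1)
        (fun x => x)
      rw [hL] at hpair
      have := (hpair.sublist (List.sublist_append_right done (d :: r')))
      exact (List.pairwise_cons.mp this).1
    -- a multiplied divisor not yet tabulated contributes gSpec 0 = 0
    have hmul : ∀ m : Int, IsDiv m → 2 ≤ m →
        t.getD (m * d) 0 = gSpec (PySem.Int.floordiv amount (m * d)) := by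
      intro m hmDiv hm2
      have hgt : d < m * d := by nlinarith
      rw [hinv (m * d)]
      split
      · rfl
      · next hnot =>
        have hnL : m * d ∉ pow2Loop amount (amount.toNat + 1) 1 := by
          intro hmem
          rw [← PySem.List.mem_sorted (key := fun x => x) (rev := true), hL] at hmem
          rcases List.mem_append.mp hmem with h | h
          · exact hnot h
          · rcases List.mem_cons.mp h with h | h
            · omega
            · have := htail _ h; omega
        have : ¬ (IsDiv (m * d) ∧ m * d ≤ amount) := fun hc => hnL ((mem_divisors ha).mpr hc)
        have hgt2 : amount < m * d := by
          by_contra hle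
          exact this ⟨IsDiv.mul_left m hmDiv hdDiv, by omega⟩
        exact (gSpec_fd_of_gt ha hgt2).symm
    -- apply the induction hypothesis to the new table
    have hres := ih (done ++ [d]) (stepB amount t d) (by rw [hL]; simp)
      (by
        intro k'
        unfold stepB
        rw [PySem.Dict.getD_insert]
        split
        · next heq =>
          subst heq
          rw [hmul 2 ⟨1, 0, by norm_num⟩ (by norm_num),
              hmul 3 ⟨0, 1, by norm_num⟩ (by norm_num),
              hmul 4 ⟨2, 0, by norm_num⟩ (by norm_num)]
          rw [if_pos (by simp)]
          have hv1 : 0 < PySem.Int.floordiv amount k' :=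
            (PySem.Int.le_floordiv_iff_mul_le (by omega)).mpr (by omega)
          rw [gSpec_pos hv1,
              fd_comp amount k' 2 ha (by omega) (by norm_num),
              fd_comp amount k' 3 ha (by omega) (by norm_num),
              fd_comp amount k' 4 ha (by omega) (by norm_num),
              mul_comm k' 2, mul_comm k' 3, mul_comm k' 4]
          exact max_comm _ _
        · next hne =>
          rw [hinv k']
          simp only [List.mem_append, List.mem_singleton]
          split <;> split <;> simp_all)
      k
    rw [List.foldl_cons, hres]
    simp only [List.append_assoc, List.singleton_append]

lemma memo_dp_alt_eq_gSpec (a : Int) (ha : 0 ≤ a) : memo_dp_alt a = gSpec a := by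
  unfold memo_dp_alt
  have h := foldB ha (PySem.List.sorted (pow2Loop a (a.toNat + 1) 1) (fun x => x) true) []
    PySem.Dict.empty rfl (by intro k; simp [PySem.Dict.getD_empty])
  simp only [List.nil_append] at h
  show (List.foldl _ PySem.Dict.empty _).getD 1 0 = gSpec a
  have hstep : (fun (t : PySem.Dict Int Int) d =>
      t.insert d (max (PySem.Int.floordiv a d)
        (t.getD (2 * d) 0 + t.getD (3 * d) 0 + t.getD (4 * d) 0))) = stepB a := rfl
  rw [hstep, h 1]
  have hfd1 : PySem.Int.floordiv a 1 = a := by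
    rw [PySem.Int.floordiv_eq_ediv_of_pos (by norm_num)]; exact Int.ediv_one a
  by_cases h1 : 1 ≤ a
  · rw [if_pos, hfd1]
    rw [PySem.List.mem_sorted]
    exact (mem_divisors ha).mpr ⟨⟨0, 0, by norm_num⟩, h1⟩
  · have ha0 : a = 0 := by omega
    rw [if_neg, ha0, gSpec_nonpos le_rfl]
    rw [PySem.List.mem_sorted]
    intro hc
    exact h1 ((mem_divisors ha).mp hc).2

-- ===== VERDICT (by name: the statement is the Claim_ definition above) =====
theorem memo_dp_spec : Claim_equal_memo_dp := by
  intro a _ hpre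
  unfold Spec_memo_dp
  rw [memo_dp_eq_gSpec a hpre, memo_dp_alt_eq_gSpec a hpre]

def memo_dp_raises : Claim_raises_memo_dp := by
  unfold Claim_raises_memo_dp
  exact ⟨fun a _ hr hp => by unfold Raises_memo_dp at hr; unfold Pre_memo_dp at hp; omega,
    by decide⟩
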